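-- pv_equiv track=rewrite | github.com/KoryHunter37/code-mastery | interview-sites/codesignal/intro/level-7/strings-rearrangement/wip.py | low_letter_difference
-- ===== SOURCE A (Python) =====
-- from collections import Counter
--
-- def low_letter_difference(s1: str, s2: str) -> bool:
--     c1 = Counter(s1)
--     c2 = Counter(s2)
--
--     keys = set(list(c1.keys()) + list(c2.keys()))
--     diff = 0
--
--     for key in keys:
--         c1_value = c1.get(key, None)
--         c2_value = c2.get(key, None)
--
--         if c1_value is None or c2_value is None:
--             diff += c1_value if c1_value is not None else c2_value
--
--         else:
--             diff += abs(c1_value - c2_value)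
--
--         if diff > 1:
--             return False
--
--     return True
-- ===== SOURCE B (Python) =====
-- def low_letter_difference(s1: str, s2: str) -> bool:
--     # Greedy multiset matching: try to cancel each char of s1 against a copy of s2;
--     # unmatched chars on either side are the total count difference.
--     rest = list(s2)
--     missing = 0
--     for ch in s1:
--         if ch in rest:
--             rest.remove(ch)
--         else:
--             missing += 1
--     return missing + len(rest) <= 1
-- ===== Notes on version B (the rewrite author's own statement) =====
-- stated objective: alternative
-- what changed: Drops Counters entirely: B greedily cancels each char of s1 against a mutable copy of s2 (list membership + remove), counting unmatched chars on both sides, instead of A's two Counters and a loop over their key union with None-handling and an early exit.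
import Mathlib
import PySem

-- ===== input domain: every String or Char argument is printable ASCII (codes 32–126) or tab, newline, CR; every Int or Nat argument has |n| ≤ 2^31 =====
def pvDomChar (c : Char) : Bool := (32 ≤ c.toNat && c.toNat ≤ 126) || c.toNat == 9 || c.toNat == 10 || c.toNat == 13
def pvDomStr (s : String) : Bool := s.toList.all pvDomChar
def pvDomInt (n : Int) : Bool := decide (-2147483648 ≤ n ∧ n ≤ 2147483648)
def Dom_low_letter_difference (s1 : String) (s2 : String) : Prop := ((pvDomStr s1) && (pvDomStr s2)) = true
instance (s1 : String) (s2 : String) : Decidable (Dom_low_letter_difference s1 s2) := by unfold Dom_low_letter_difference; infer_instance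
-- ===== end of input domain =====

-- B drops the Counters entirely: it greedily cancels each char of s1 against a mutable
-- copy of s2 and counts the unmatched chars on both sides (objective: alternative).

-- ===== PORT A =====
-- the 'for key in keys' loop with its early 'return False'; the result is iteration-order
-- independent (each contribution is nonnegative), so folding in PySem.Set order is exact
def lldLoop (c1 c2 : PySem.Dict Char Int) : List Char → Int → Bool
  | [], _ => true
  | key :: ks, diff =>
    let c1v := c1.get? key
    let c2v := c2.get? key
    let diff' :=
      if c1v = none ∨ c2v = none then
        -- 'diff += c1_value if c1_value is not None else c2_value'; both-None is unreachable
        -- (key comes from the union of the key sets), so the final .getD 0 never fires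
        diff + (match c1v with | some v => v | none => c2v.getD 0)
      else
        diff + |c1v.getD 0 - c2v.getD 0|
    if diff' > 1 then false else lldLoop c1 c2 ks diff'

def low_letter_difference (s1 : String) (s2 : String) : Bool :=
  let c1 := PySem.Dict.counter s1.toList
  let c2 := PySem.Dict.counter s2.toList
  let keys := PySem.Set.ofList (c1.keys ++ c2.keys)
  lldLoop c1 c2 keys 0

-- ===== PORT B =====
-- state is (rest, missing); 'rest.remove(ch)' (first occurrence) is List.erase
def low_letter_difference_alt (s1 : String) (s2 : String) : Bool :=
  let st := s1.toList.foldl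
    (fun (st : List Char × Int) ch =>
      if st.1.contains ch then (st.1.erase ch, st.2) else (st.1, st.2 + 1))
    (s2.toList, 0)
  decide (st.2 + (st.1.length : Int) ≤ 1)

-- ===== PRECONDITION & SPEC =====
def Spec_low_letter_difference (s1 : String) (s2 : String) (out : Bool) : Prop := out = low_letter_difference_alt s1 s2
instance (s1 : String) (s2 : String) (out : Bool) : Decidable (Spec_low_letter_difference s1 s2 out) := by unfold Spec_low_letter_difference; infer_instance

-- ===== CLAIM (what is proved, stated in full; the proofs are below) =====
def Claim_equal_low_letter_difference : Prop := ∀ (s1 : String) (s2 : String), Dom_low_letter_difference s1 s2 → Spec_low_letter_difference s1 s2 (low_letter_difference s1 s2)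

-- ===== LEMMAS AND PROOFS =====

-- per-key increment of A's loop, for counters: always the absolute count difference
theorem lld_step (xs ys : List Char) (k : Char) (diff : Int) :
    (let c1v := (PySem.Dict.counter xs).get? k
     let c2v := (PySem.Dict.counter ys).get? k
     if c1v = none ∨ c2v = none then
       diff + (match c1v with | some v => v | none => c2v.getD 0)
     else
       diff + |c1v.getD 0 - c2v.getD 0|)
    = diff + |((xs.count k : Int)) - ((ys.count k : Int))| := by
  have h1 : ((PySem.Dict.counter xs).get? k).getD 0 = (xs.count k : Int) := by
    rw [← PySem.Dict.getD_eq_get?_getD, PySem.Dict.getD_counter]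
  have h2 : ((PySem.Dict.counter ys).get? k).getD 0 = (ys.count k : Int) := by
    rw [← PySem.Dict.getD_eq_get?_getD, PySem.Dict.getD_counter]
  by_cases hx : (PySem.Dict.counter xs).get? k = none
  · have hxc : xs.count k = 0 := by
      have := (PySem.Dict.get?_eq_none_iff_contains _ k).mp hx
      rw [PySem.Dict.contains_counter] at this
      simpa [List.count_eq_zero, List.contains_eq_mem] using this
    by_cases hy : (PySem.Dict.counter ys).get? k = none
    · have hyc : ys.count k = 0 := by
        have := (PySem.Dict.get?_eq_none_iff_contains _ k).mp hy
        rw [PySem.Dict.contains_counter] at this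
        simpa [List.count_eq_zero, List.contains_eq_mem] using this
      simp [hx, hy, hxc, hyc]
    · obtain ⟨v, hv⟩ := Option.ne_none_iff_exists'.mp hy
      simp only [hx, hv, true_or, if_pos]
      have hv' : v = (ys.count k : Int) := by simpa [hv] using h2
      have habs : |((xs.count k : Int)) - ((ys.count k : Int))| = (ys.count k : Int) := by
        rw [hxc]; push_cast
        rw [abs_of_nonpos (by omega)]; ring
      simp [hv', habs]
  · obtain ⟨v1, hv1⟩ := Option.ne_none_iff_exists'.mp hx
    have hv1' : v1 = (xs.count k : Int) := by simpa [hv1] using h1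
    by_cases hy : (PySem.Dict.counter ys).get? k = none
    · have hyc : ys.count k = 0 := by
        have := (PySem.Dict.get?_eq_none_iff_contains _ k).mp hy
        rw [PySem.Dict.contains_counter] at this
        simpa [List.count_eq_zero, List.contains_eq_mem] using this
      have habs : |((xs.count k : Int)) - ((ys.count k : Int))| = (xs.count k : Int) := by
        rw [hyc]; push_cast
        rw [abs_of_nonneg (by omega)]; ring
      simp [hv1, hy, hv1', habs]
    · obtain ⟨v2, hv2⟩ := Option.ne_none_iff_exists'.mp hy
      have hv2' : v2 = (ys.count k : Int) := by simpa [hv2] using h2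
      simp [hv1, hv2, hv1', hv2']

-- A's early-exit loop computes 'accumulated sum ≤ 1' (all contributions are nonnegative)
theorem lldLoop_eq (xs ys : List Char) (ks : List Char) (diff : Int) (hdiff : diff ≤ 1) :
    lldLoop (PySem.Dict.counter xs) (PySem.Dict.counter ys) ks diff
      = decide (diff + (ks.map (fun k => |((xs.count k : Int)) - ((ys.count k : Int))|)).sum ≤ 1) := by
  induction ks generalizing diff with
  | nil => simp [lldLoop, hdiff]
  | cons k ks ih =>
    rw [lldLoop]
    rw [lld_step xs ys k diff]
    by_cases h : diff + |((xs.count k : Int)) - ((ys.count k : Int))| > 1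
    · rw [if_pos h]
      have hsum : 0 ≤ (ks.map (fun k => |((xs.count k : Int)) - ((ys.count k : Int))|)).sum := by
        apply List.sum_nonneg; intro x hx
        simp only [List.mem_map] at hx
        obtain ⟨a, _, rfl⟩ := hx
        exact abs_nonneg _
      simp only [List.map_cons, List.sum_cons]
      symm
      rw [decide_eq_false_iff_not]
      omega
    · rw [if_neg h, ih _ (by omega)]
      simp only [List.map_cons, List.sum_cons]
      congr 1
      ring_nf

-- adding 'one at key c' under a sum over K contributes K.count c
theorem sum_map_split (K : List Char) (g : Char → Int) (c : Char) :
    (K.map (fun k => g k + if k = c then (1:Int) else 0)).sum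
      = (K.map g).sum + (K.count c : Int) := by
  induction K with
  | nil => simp
  | cons a K ih =>
    simp only [List.map_cons, List.sum_cons, ih, List.count_cons]
    by_cases h : a = c
    · subst h; simp; ring
    · have hb : (a == c) = false := by simpa using h
      rw [if_neg h, hb]
      simp; ring

-- summing a list's counts over a nodup key list covering its elements gives its length
theorem sum_count_eq_length (K : List Char) (hK : K.Nodup) :
    ∀ (r : List Char), (∀ c ∈ r, c ∈ K) →
      (K.map (fun k => (r.count k : Int))).sum = r.length := by
  intro r
  induction r with
  | nil => intro _; simp
  | cons c r ih =>
    intro hmem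
    have h1 : (K.map (fun k => ((c :: r).count k : Int))).sum
        = (K.map (fun k => (r.count k : Int))).sum + (K.count c : Int) := by
      rw [← sum_map_split K (fun k => (r.count k : Int)) c]
      apply congrArg
      apply List.map_congr_left
      intro k _
      rw [List.count_cons]
      by_cases h : c = k
      · subst h; simp
      · have hb : (c == k) = false := by simpa using h
        have hb2 : ¬ (k = c) := fun e => h e.symm
        rw [hb, if_neg hb2]
        simp
    rw [h1, ih (fun a ha => hmem a (List.mem_cons_of_mem _ ha))]
    have : K.count c = 1 := List.count_eq_one_of_mem hK (hmem c (List.mem_cons_self ..))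
    rw [this, List.length_cons]
    push_cast; ring

-- loop invariant for B: unmatched-on-both-sides equals the summed absolute count difference
theorem loop_sum (K : List Char) (hK : K.Nodup) :
    ∀ (xs rest : List Char) (m : Int), (∀ c ∈ xs, c ∈ K) → (∀ c ∈ rest, c ∈ K) →
      (xs.foldl
        (fun (st : List Char × Int) ch =>
          if st.1.contains ch then (st.1.erase ch, st.2) else (st.1, st.2 + 1)) (rest, m)).2
      + (((xs.foldl
        (fun (st : List Char × Int) ch =>
          if st.1.contains ch then (st.1.erase ch, st.2) else (st.1, st.2 + 1)) (rest, m)).1.length : Int))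
      = m + (K.map (fun k => |((xs.count k : Int)) - (rest.count k : Int)|)).sum := by
  intro xs
  induction xs with
  | nil =>
    intro rest m _ hrest
    simp only [List.foldl_nil]
    have : (K.map (fun k => |(((([] : List Char)).count k : Int)) - (rest.count k : Int)|))
        = K.map (fun k => (rest.count k : Int)) := by
      apply List.map_congr_left
      intro k _
      simp only [List.count_nil, Nat.cast_zero, zero_sub, abs_neg]
      exact abs_of_nonneg (by positivity)
    rw [this, sum_count_eq_length K hK rest hrest]
  | cons c xs ih =>
    intro rest m hxs hrest
    have hcK : c ∈ K := hxs c (List.mem_cons_self ..)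
    have hxs' : ∀ a ∈ xs, a ∈ K := fun a ha => hxs a (List.mem_cons_of_mem _ ha)
    simp only [List.foldl_cons]
    by_cases hc : c ∈ rest
    · have hct : rest.contains c = true := by simpa [List.contains_eq_mem] using hc
      rw [if_pos hct]
      have hrest' : ∀ a ∈ rest.erase c, a ∈ K := fun a ha => hrest a (List.mem_of_mem_erase ha)
      rw [ih (rest.erase c) m hxs' hrest']
      congr 1
      apply congrArg
      apply List.map_congr_left
      intro k _
      have hcnt : 1 ≤ rest.count c := List.count_pos_iff.mpr hc
      rw [List.count_cons, List.count_erase]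
      by_cases h : c = k
      · subst h
        simp only [beq_self_eq_true, if_true]
        have hle : ((rest.count c - 1 : Nat) : Int) = (rest.count c : Int) - 1 :=
          Int.ofNat_sub hcnt
        rw [hle]
        push_cast
        congr 1; ring
      · have hb : (c == k) = false := by simpa using h
        rw [hb]
        simp
    · have hct : ¬ (rest.contains c = true) := by simpa [List.contains_eq_mem] using hc
      rw [if_neg hct]
      rw [ih rest (m + 1) hxs' hrest]
      have hsplit : (K.map (fun k => |(((c :: xs).count k : Int)) - (rest.count k : Int)|)).sum
          = (K.map (fun k => |((xs.count k : Int)) - (rest.count k : Int)|)).sum + (K.count c : Int) := by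
        rw [← sum_map_split K (fun k => |((xs.count k : Int)) - (rest.count k : Int)|) c]
        apply congrArg
        apply List.map_congr_left
        intro k _
        rw [List.count_cons]
        by_cases h : c = k
        · subst h
          have h0 : rest.count c = 0 := List.count_eq_zero.mpr hc
          have ha : (0:Int) ≤ (xs.count c : Int) := Int.natCast_nonneg _
          simp only [beq_self_eq_true, if_true, h0]
          rw [abs_of_nonneg (by push_cast; omega), abs_of_nonneg (by push_cast; omega)]
          push_cast; ring
        · have hb : (c == k) = false := by simpa using h
          have hb2 : ¬ (k = c) := fun e => h e.symm
          rw [hb, if_neg hb2]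
          simp
      rw [hsplit, List.count_eq_one_of_mem hK hcK]
      push_cast; ring

theorem low_letter_difference_spec : Claim_equal_low_letter_difference := by
  intro s1 s2 _
  unfold Spec_low_letter_difference low_letter_difference low_letter_difference_alt
  set xs := s1.toList
  set ys := s2.toList
  set K := PySem.Set.ofList ((PySem.Dict.counter xs).keys ++ (PySem.Dict.counter ys).keys) with hKdef
  have hK : K.Nodup := PySem.Set.nodup_ofList _
  have hmem : ∀ c, (c ∈ xs ∨ c ∈ ys) → c ∈ K := by
    intro c hc
    rw [hKdef, PySem.Set.mem_ofList, List.mem_append,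
      PySem.Dict.keys_counter, PySem.Dict.keys_counter, PySem.Set.mem_ofList, PySem.Set.mem_ofList]
    exact hc
  simp only []
  rw [lldLoop_eq xs ys K 0 (by omega)]
  rw [loop_sum K hK xs ys 0 (fun c hc => hmem c (Or.inl hc)) (fun c hc => hmem c (Or.inr hc))]

-- ===== VERDICT (by name: the statement is the Claim_ definition above) =====
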